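-- pv_equiv track=rewrite | github.com/canalqb/teoremas | Teorema_de_Yoneda/yoneda_count_growth.py | gerar_tabela
-- ===== SOURCE A (Python) =====
-- def gerar_tabela(n_max):
--     tabela = []
--
--     acumulado = 0  # Total acumulado simula quantidade de "visões" ou "morfismos"
--
--     for n in range(n_max + 1):
--         inicio = 2**n
--         fim = 2**(n+1) - 1
--
--         # Yoneda: número de formas de "ver" esse nível baseado nos anteriores
--         # Vamos simular isso usando um acumulador + o próprio valor atual
--         acumulado += inicio  # como se novos morfismos fossem adicionados
--         yoneda_estimado = acumulado  # nossa estimativa do que o teorema "esperaria"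
--
--         tabela.append((n, inicio, yoneda_estimado, fim))
--
--     return tabela
-- ===== SOURCE B (Python) =====
-- def gerar_tabela(n_max):
--     # closed form: 2^0 + ... + 2^n = 2^(n+1) - 1, so the running total equals fim
--     return [(n, p, 2 * p - 1, 2 * p - 1) for n in range(n_max + 1) for p in (2 ** n,)]
-- ===== Notes on version B (the rewrite author's own statement) =====
-- stated objective: simpler
-- what changed: Replaces the threaded running-sum accumulator by the closed form for a geometric sum of powers of two (which equals the row's upper bound), so each row is emitted directly from its index alone.
import Mathlib
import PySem

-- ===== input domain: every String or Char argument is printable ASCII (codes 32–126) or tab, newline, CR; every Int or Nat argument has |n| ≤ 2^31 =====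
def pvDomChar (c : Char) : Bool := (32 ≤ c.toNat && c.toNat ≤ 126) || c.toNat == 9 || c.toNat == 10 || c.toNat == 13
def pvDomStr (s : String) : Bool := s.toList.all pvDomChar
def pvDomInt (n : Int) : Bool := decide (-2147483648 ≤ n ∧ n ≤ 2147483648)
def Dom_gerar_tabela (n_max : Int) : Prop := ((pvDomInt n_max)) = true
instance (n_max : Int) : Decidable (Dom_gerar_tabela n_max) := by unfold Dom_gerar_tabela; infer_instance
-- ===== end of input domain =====

-- B replaces A's running accumulator by the closed form for the geometric sum of powers of two (simpler, stateless).

-- ===== PORT A =====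
def gerar_tabela (n_max : Int) : List (Int × Int × Int × Int) :=
  ((PySem.List.pyRange 0 (n_max + 1) 1).foldl
    (fun (st : List (Int × Int × Int × Int) × Int) n =>
      let inicio : Int := 2 ^ n.toNat
      let fim : Int := 2 ^ (n + 1).toNat - 1
      let acumulado := st.2 + inicio
      (st.1 ++ [(n, inicio, acumulado, fim)], acumulado))
    ([], 0)).1

-- ===== PORT B =====
def gerar_tabela_alt (n_max : Int) : List (Int × Int × Int × Int) :=
  (PySem.List.pyRange 0 (n_max + 1) 1).map
    (fun n => let p : Int := 2 ^ n.toNat; (n, p, 2 * p - 1, 2 * p - 1))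

-- ===== PRECONDITION & SPEC =====
def Spec_gerar_tabela (n_max : Int) (out : List (Int × Int × Int × Int)) : Prop := out = gerar_tabela_alt n_max
instance (n_max : Int) (out : List (Int × Int × Int × Int)) : Decidable (Spec_gerar_tabela n_max out) := by unfold Spec_gerar_tabela; infer_instance

-- ===== CLAIM (what is proved, stated in full; the proofs are below) =====
def Claim_equal_gerar_tabela : Prop := ∀ (n_max : Int), Dom_gerar_tabela n_max → Spec_gerar_tabela n_max (gerar_tabela n_max)

-- ===== LEMMAS AND PROOFS =====

-- invariant: after folding over range N, the list is the map of the closed form and the accumulator is 2^N - 1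
theorem gerar_tabela_fold_inv (N : Nat) :
    (List.map (fun (k : Nat) => (k : Int)) (List.range N)).foldl
      (fun (st : List (Int × Int × Int × Int) × Int) n =>
        let inicio : Int := 2 ^ n.toNat
        let fim : Int := 2 ^ (n + 1).toNat - 1
        let acumulado := st.2 + inicio
        (st.1 ++ [(n, inicio, acumulado, fim)], acumulado))
      ([], 0)
    = (List.map (fun (k : Nat) => ((k : Int), (2 : Int) ^ k, (2 : Int) ^ (k + 1) - 1, (2 : Int) ^ (k + 1) - 1)) (List.range N),
       (2 : Int) ^ N - 1) := by
  induction N with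
  | zero => simp
  | succ m ih =>
    rw [List.range_succ, List.map_append, List.foldl_append, ih, List.map_append]
    have h1 : ((m : Int)).toNat = m := by omega
    have h2 : ((m : Int) + 1).toNat = m + 1 := by omega
    simp only [List.map_cons, List.map_nil, List.foldl_cons, List.foldl_nil, h1, h2, Prod.mk.injEq]
    constructor
    · congr 1
      have : (2 : Int) ^ m - 1 + 2 ^ m = 2 ^ (m + 1) - 1 := by ring
      simp [this]
    · ring

theorem gerar_tabela_eq (n_max : Int) : gerar_tabela n_max = gerar_tabela_alt n_max := by
  unfold gerar_tabela gerar_tabela_alt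
  rw [PySem.List.pyRange_one]
  simp only [zero_add, Int.sub_zero]
  rw [gerar_tabela_fold_inv]
  simp only [List.map_map]
  apply List.map_congr_left
  intro k _
  have h1 : ((k : Int)).toNat = k := by omega
  have h2 : 2 * (2 : Int) ^ k - 1 = 2 ^ (k + 1) - 1 := by ring
  simp [Function.comp, h1, h2]

-- ===== VERDICT (by name: the statement is the Claim_ definition above) =====
theorem gerar_tabela_spec : Claim_equal_gerar_tabela := by
  intro n_max _
  exact gerar_tabela_eq n_max
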